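-- pv_equiv track=rewrite | github.com/ChrisGerhart/pm | main.py | make_table_rows
-- ===== SOURCE A (Python) =====
-- def make_table_rows(tasks):
--     all_keys = []
--     for task in tasks:
--         for key in task.keys():
--             all_keys.append(key)
--     keys = sorted(set(all_keys), key=all_keys.index)
--     rows = [keys]
--     for task in tasks:
--         new_row = []
--         for key in keys:
--             new_row.append(task.get(key, ""))
--         rows.append(new_row)
--     return rows
-- ===== SOURCE B (Python) =====
-- def make_table_rows(tasks):
--     keys = []
--     seen = set()
--     for task in tasks:
--         for key in task.keys():
--             if key not in seen:
--                 seen.add(key)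
--                 keys.append(key)
--     return [keys] + [[task.get(key, "") for key in keys] for task in tasks]
-- ===== Notes on version B (the rewrite author's own statement) =====
-- stated objective: faster
-- what changed: Replaced A's two-stage dedup (collect every key, then sorted(set(...), key=all_keys.index), whose key function rescans all_keys) with a single incremental pass maintaining a seen-set, and replaced A's append loops for rows with list comprehensions.
import Mathlib
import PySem

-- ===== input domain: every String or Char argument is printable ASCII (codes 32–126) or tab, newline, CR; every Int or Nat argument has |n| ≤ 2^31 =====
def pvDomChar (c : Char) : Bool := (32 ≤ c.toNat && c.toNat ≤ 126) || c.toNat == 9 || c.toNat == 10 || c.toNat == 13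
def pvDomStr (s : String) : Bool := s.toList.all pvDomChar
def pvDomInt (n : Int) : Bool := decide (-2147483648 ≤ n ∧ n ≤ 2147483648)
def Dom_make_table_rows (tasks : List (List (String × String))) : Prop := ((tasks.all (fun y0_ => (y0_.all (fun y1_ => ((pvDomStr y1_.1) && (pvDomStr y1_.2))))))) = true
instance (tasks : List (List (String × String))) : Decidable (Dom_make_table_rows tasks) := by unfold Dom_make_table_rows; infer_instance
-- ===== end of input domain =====

-- B replaces A's two-stage dedup (collect all keys, then sorted(set(...), key=all_keys.index))
-- by a single incremental pass with a seen-set, and builds rows by comprehensions; same values.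

-- ===== PORT A =====
def make_table_rows (tasks : List (List (String × String))) : List (List String) :=
  -- all_keys = []; for task in tasks: for key in task.keys(): all_keys.append(key)
  let all_keys : List String :=
    tasks.foldl (fun acc task => task.foldl (fun a kv => a ++ [kv.1]) acc) []
  -- keys = sorted(set(all_keys), key=all_keys.index)  (index never raises: every element is in all_keys)
  let keys : List String :=
    PySem.List.sorted (PySem.Set.ofList all_keys)
      (fun k => (PySem.List.index? all_keys k).getD 0) false
  -- rows = [keys]; for task in tasks: rows.append(new_row built by appending task.get(key, ""))
  tasks.foldl
    (fun rows task =>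
      rows ++ [keys.foldl (fun r k => r ++ [(PySem.Dict.mk task).getD k ""]) []])
    [keys]

-- ===== PORT B =====
def make_table_rows_alt (tasks : List (List (String × String))) : List (List String) :=
  -- keys = []; seen = set(); for task in tasks: for key in task.keys():
  --   if key not in seen: seen.add(key); keys.append(key)
  let st : List String × PySem.Set String :=
    tasks.foldl
      (fun st task =>
        (task.map (fun kv => kv.1)).foldl
          (fun st k =>
            if PySem.Set.contains st.2 k then st
            else (st.1 ++ [k], PySem.Set.add st.2 k)) st)
      ([], PySem.Set.empty)
  let keys := st.1
  -- [keys] + [[task.get(key, "") for key in keys] for task in tasks]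
  keys :: tasks.map (fun task => keys.map (fun k => (PySem.Dict.mk task).getD k ""))

-- ===== PRECONDITION & SPEC =====
def Spec_make_table_rows (tasks : List (List (String × String))) (out : List (List String)) : Prop := out = make_table_rows_alt tasks
instance (tasks : List (List (String × String))) (out : List (List String)) : Decidable (Spec_make_table_rows tasks out) := by unfold Spec_make_table_rows; infer_instance

-- ===== CLAIM (what is proved, stated in full; the proofs are below) =====
def Claim_equal_make_table_rows : Prop := ∀ (tasks : List (List (String × String))), Dom_make_table_rows tasks → Spec_make_table_rows tasks (make_table_rows tasks)

-- ===== LEMMAS AND PROOFS =====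

-- A's key-collection loop is the flatMap of first components.
theorem allKeys_eq (tasks : List (List (String × String))) : ∀ (init : List String),
    tasks.foldl (fun acc task => task.foldl (fun a kv => a ++ [kv.1]) acc) init
      = init ++ tasks.flatMap (fun t => t.map (fun kv => kv.1)) := by
  induction tasks with
  | nil => intro init; simp
  | cons t ts ih =>
      intro init
      rw [List.foldl_cons, PySem.List.foldl_append_singleton_eq_map (fun kv => kv.1) t init,
        ih, List.flatMap_cons, List.append_assoc]

-- first-occurrence indexes along Set.ofList are strictly increasing
theorem ofList_index_pairwise (L : List String) :
    (PySem.Set.ofList L).Pairwise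
      (fun a b => (PySem.List.index? L a).getD 0 < (PySem.List.index? L b).getD 0) := by
  induction L using List.reverseRecOn with
  | nil => simp [PySem.Set.ofList]
  | append_singleton L x ih =>
      rw [PySem.Set.ofList_append_singleton, PySem.Set.add_eq_ite]
      have keyeq : ∀ a ∈ PySem.Set.ofList L,
          PySem.List.index? (L ++ [x]) a = PySem.List.index? L a := fun a ha =>
        PySem.List.index?_append_of_mem _ ((PySem.Set.mem_ofList _ _).mp ha)
      by_cases hx : x ∈ PySem.Set.ofList L
      · rw [if_pos hx]
        exact List.Pairwise.imp_of_mem (fun {a b} ha hb h => by rwa [keyeq a ha, keyeq b hb]) ih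
      · rw [if_neg hx, List.pairwise_append]
        refine ⟨List.Pairwise.imp_of_mem (fun {a b} ha hb h => by rwa [keyeq a ha, keyeq b hb]) ih,
          by simp, ?_⟩
        intro a ha b hb
        rw [List.mem_singleton] at hb
        rw [hb, keyeq a ha,
          PySem.List.index?_append_singleton_self L x
            (fun h => hx ((PySem.Set.mem_ofList _ _).mpr h))]
        have hax : a ∈ L := (PySem.Set.mem_ofList _ _).mp ha
        obtain ⟨k, hk⟩ := Option.isSome_iff_exists.mp ((PySem.List.index?_isSome_iff _ _).mpr hax)
        obtain ⟨hlt, -, -⟩ := PySem.List.getElem_of_index?_eq_some hk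
        rw [hk]
        simpa using hlt

-- A's sorted(set(all_keys), key=all_keys.index) is exactly first-occurrence dedup order
theorem sorted_set_by_index (L : List String) :
    PySem.List.sorted (PySem.Set.ofList L)
      (fun k => (PySem.List.index? L k).getD 0) false = PySem.Set.ofList L :=
  PySem.List.sorted_eq_of_perm_of_pairwise_lt _ _ _ (List.Perm.refl _) (ofList_index_pairwise L)

-- B's inner loop stays on the diagonal (keys = seen) and is a Set.add fold
theorem inner_diag (ks : List String) (s : PySem.Set String) :
    ks.foldl
      (fun (st : List String × PySem.Set String) k =>
        if PySem.Set.contains st.2 k then st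
        else (st.1 ++ [k], PySem.Set.add st.2 k)) (s, s)
      = (ks.foldl PySem.Set.add s, ks.foldl PySem.Set.add s) := by
  induction ks generalizing s with
  | nil => rfl
  | cons k ks ih =>
      simp only [List.foldl]
      by_cases h : PySem.Set.contains s k
      · have he : PySem.Set.add s k = s := by
          rw [PySem.Set.add_eq_ite, if_pos ((PySem.Set.contains_iff _ _).mp h)]
        rw [if_pos h, ← ih, he]
      · have he : PySem.Set.add s k = s ++ [k] := by
          rw [PySem.Set.add_eq_ite,
            if_neg (fun hm => h ((PySem.Set.contains_iff _ _).mpr hm))]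
        rw [if_neg h, he, ih, ← he]

-- B's whole dedup pass computes Set.ofList of the flatMap of keys
theorem alt_keys_eq (tasks : List (List (String × String))) :
    (tasks.foldl
      (fun (st : List String × PySem.Set String) task =>
        (task.map (fun kv => kv.1)).foldl
          (fun st k =>
            if PySem.Set.contains st.2 k then st
            else (st.1 ++ [k], PySem.Set.add st.2 k)) st)
      ([], PySem.Set.empty)).1
      = PySem.Set.ofList (tasks.flatMap (fun t => t.map (fun kv => kv.1))) := by
  have gen : ∀ (s : PySem.Set String),
      tasks.foldl
        (fun (st : List String × PySem.Set String) task =>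
          (task.map (fun kv => kv.1)).foldl
            (fun st k =>
              if PySem.Set.contains st.2 k then st
              else (st.1 ++ [k], PySem.Set.add st.2 k)) st)
        (s, s)
        = ((tasks.flatMap (fun t => t.map (fun kv => kv.1))).foldl PySem.Set.add s,
           (tasks.flatMap (fun t => t.map (fun kv => kv.1))).foldl PySem.Set.add s) := by
    induction tasks with
    | nil => intro s; rfl
    | cons t ts ih =>
        intro s
        simp only [List.foldl, List.flatMap_cons, List.foldl_append]
        rw [inner_diag, ih]
  rw [PySem.Set.ofList_eq_foldl]
  exact congrArg Prod.fst (gen PySem.Set.empty)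

-- appending one built row per task is mapping the row builder
theorem rows_foldl_eq_map (tasks : List (List (String × String))) (keys : List String)
    (init : List (List String)) :
    tasks.foldl
      (fun rows task =>
        rows ++ [keys.foldl (fun r k => r ++ [(PySem.Dict.mk task).getD k ""]) []])
      init
      = init ++ tasks.map (fun task => keys.map (fun k => (PySem.Dict.mk task).getD k "")) := by
  rw [PySem.List.foldl_append_singleton_eq_map
    (fun task => keys.foldl (fun r k => r ++ [(PySem.Dict.mk task).getD k ""]) []) tasks init]
  refine congrArg (init ++ ·) (List.map_congr_left fun t _ => ?_)
  rw [PySem.List.foldl_append_singleton_eq_map (fun k => (PySem.Dict.mk t).getD k "") keys [],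
    List.nil_append]

-- ===== VERDICT (by name: the statement is the Claim_ definition above) =====
theorem make_table_rows_spec : Claim_equal_make_table_rows := by
  intro tasks _
  unfold Spec_make_table_rows
  simp only [make_table_rows, make_table_rows_alt]
  rw [allKeys_eq tasks [], List.nil_append, sorted_set_by_index, alt_keys_eq,
    rows_foldl_eq_map]
  simp
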